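-- pv_equiv track=rewrite | github.com/Defiler1/Python | Ch6.py | search_widest_gap
-- ===== SOURCE A (Python) =====
-- def search_widest_gap(ss):
--    if len(ss) == 0:
--       return None, 0
--    elif len(ss) == 1:
--       return 0,0
--    else:
--       maxgap = 0
--       index = 0
--       for i in range(len(ss) - 1):
--          gap = ss[i + 1] - ss[i]
--          if gap > maxgap:
--             maxgap = gap
--             index = i
--       return index, maxgap
-- ===== SOURCE B (Python) =====
-- def search_widest_gap(ss):
--     if len(ss) == 0:
--         return None, 0
--     if len(ss) == 1:
--         return 0, 0
--     gaps = [b - a for a, b in zip(ss, ss[1:])]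
--     m = max(gaps)
--     if m > 0:
--         return gaps.index(m), m
--     return 0, 0
-- ===== Notes on version B (the rewrite author's own statement) =====
-- stated objective: idiomatic
-- what changed: A's single running-max loop with mutable maxgap/index state is replaced by building the full gap list, taking the library max, and locating its first occurrence with list.index, falling back to index zero and zero width when no gap is positive.
import Mathlib
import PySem

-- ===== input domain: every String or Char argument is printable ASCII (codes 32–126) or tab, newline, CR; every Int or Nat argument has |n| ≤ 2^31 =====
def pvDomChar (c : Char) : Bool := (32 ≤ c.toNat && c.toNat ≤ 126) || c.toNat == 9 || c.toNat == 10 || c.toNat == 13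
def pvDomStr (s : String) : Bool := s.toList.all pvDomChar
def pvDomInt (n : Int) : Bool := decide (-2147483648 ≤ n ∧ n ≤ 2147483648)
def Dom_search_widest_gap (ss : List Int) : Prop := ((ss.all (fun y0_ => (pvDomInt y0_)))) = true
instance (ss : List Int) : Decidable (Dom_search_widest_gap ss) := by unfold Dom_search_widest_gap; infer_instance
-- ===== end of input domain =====

-- B replaces A's running-max loop by build-gap-list / library max / first-occurrence index (idiomatic, same cost).

-- ===== PORT A =====
def search_widest_gap (ss : List Int) : Option Int × Int :=
  if ss.length = 0 then (none, 0)
  else if ss.length = 1 then (some 0, 0)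
  else
    let r := (PySem.List.pyRange 0 ((ss.length : Int) - 1) 1).foldl
      (fun (st : Int × Int) i =>
        let gap := PySem.List.pyGetD ss (i + 1) 0 - PySem.List.pyGetD ss i 0
        if gap > st.1 then (gap, i) else st) (0, 0)
    (some r.2, r.1)

-- ===== PORT B =====
def search_widest_gap_alt (ss : List Int) : Option Int × Int :=
  if ss.length = 0 then (none, 0)
  else if ss.length = 1 then (some 0, 0)
  else
    let gaps := (ss.zip (ss.drop 1)).map (fun p => p.2 - p.1)
    let m := (PySem.List.max? gaps (fun y => y)).getD 0  -- gaps is nonempty here, so the default is never used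
    if m > 0 then (some (((PySem.List.index? gaps m).getD 0 : Nat) : Int), m)
    else (some 0, 0)

-- ===== PRECONDITION & SPEC =====
def Spec_search_widest_gap (ss : List Int) (out : Option Int × Int) : Prop := out = search_widest_gap_alt ss
instance (ss : List Int) (out : Option Int × Int) : Decidable (Spec_search_widest_gap ss out) := by unfold Spec_search_widest_gap; infer_instance

-- ===== CLAIM (what is proved, stated in full; the proofs are below) =====
def Claim_equal_search_widest_gap : Prop := ∀ (ss : List Int), Dom_search_widest_gap ss → Spec_search_widest_gap ss (search_widest_gap ss)

-- ===== LEMMAS AND PROOFS =====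

def pvStep (st : Int × Int) (p : Int × Int) : Int × Int :=
  if p.2 > st.1 then (p.2, p.1) else st

theorem pvFold_all_le (l : List Int) (s m i : Int) (h : ∀ g ∈ l, g ≤ m) :
    (PySem.List.enumerate l s).foldl pvStep (m, i) = (m, i) := by
  induction l generalizing s with
  | nil => simp [PySem.List.enumerate_nil]
  | cons g t ih =>
    rw [PySem.List.enumerate_cons]
    simp only [List.foldl_cons]
    have hg : ¬ g > m := not_lt.mpr (h g (List.mem_cons_self ..))
    simp only [pvStep, if_neg hg]
    exact ih (s + 1) (fun x hx => h x (List.mem_cons_of_mem _ hx))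

theorem pvFold_max (l : List Int) (M : Int) (hM : M ∈ l) (hub : ∀ g ∈ l, g ≤ M) :
    ∀ (s m i : Int), m < M →
      (PySem.List.enumerate l s).foldl pvStep (m, i)
        = (M, s + (((PySem.List.index? l M).getD 0 : Nat) : Int)) := by
  induction l with
  | nil => cases hM
  | cons g t ih =>
    intro s m i hm
    rw [PySem.List.enumerate_cons]
    simp only [List.foldl_cons]
    by_cases hg : g = M
    · subst hg
      simp only [pvStep, if_pos hm]
      rw [pvFold_all_le t (s + 1) g s (fun x hx => hub x (List.mem_cons_of_mem _ hx))]
      rw [PySem.List.index?_cons_self]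
      simp
    · have hMt : M ∈ t := by
        cases hM with
        | head => exact absurd rfl hg
        | tail _ h => exact h
      have hgM : g < M := lt_of_le_of_ne (hub g (List.mem_cons_self ..)) hg
      have hub' : ∀ x ∈ t, x ≤ M := fun x hx => hub x (List.mem_cons_of_mem _ hx)
      obtain ⟨k, hk⟩ : ∃ k, PySem.List.index? t M = some k := by
        cases hx : PySem.List.index? t M with
        | none => exact absurd hMt ((PySem.List.index?_eq_none_iff t M).mp hx)
        | some k => exact ⟨k, rfl⟩
      have hidx : PySem.List.index? (g :: t) M = some (k + 1) := by
        rw [PySem.List.index?_cons_of_ne t hg, hk]; rfl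
      by_cases hgm : g > m
      · simp only [pvStep, if_pos hgm]
        rw [ih hMt hub' (s + 1) g s hgM, hidx, hk]
        simp only [Prod.mk.injEq, true_and, Option.getD_some]
        push_cast; ring
      · simp only [pvStep, if_neg hgm]
        rw [ih hMt hub' (s + 1) m i hm, hidx, hk]
        simp only [Prod.mk.injEq, true_and, Option.getD_some]
        push_cast; ring

theorem pvGaps_len (ss : List Int) :
    ((ss.zip (ss.drop 1)).map (fun p => p.2 - p.1)).length = ss.length - 1 := by
  simp [List.length_zip]

-- ===== VERDICT (by name: the statement is the Claim_ definition above) =====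
theorem search_widest_gap_spec : Claim_equal_search_widest_gap := by
  intro ss _
  unfold Spec_search_widest_gap search_widest_gap search_widest_gap_alt
  by_cases h0 : ss.length = 0
  · simp [h0]
  by_cases h1 : ss.length = 1
  · simp [h1]
  simp only [if_neg h0, if_neg h1]
  have hn : 2 ≤ ss.length := by omega
  set gaps := (ss.zip (ss.drop 1)).map (fun p => p.2 - p.1) with hgaps
  have hlen : gaps.length = ss.length - 1 := pvGaps_len ss
  have hglen : (gaps.length : Int) = (ss.length : Int) - 1 := by
    rw [hlen]; omega
  -- A's fold over the index range equals the fold of pvStep over the enumerated gap list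
  have hbridge :
      (PySem.List.pyRange 0 ((ss.length : Int) - 1) 1).foldl
        (fun (st : Int × Int) i =>
          let gap := PySem.List.pyGetD ss (i + 1) 0 - PySem.List.pyGetD ss i 0
          if gap > st.1 then (gap, i) else st) (0, 0)
      = (PySem.List.enumerate gaps 0).foldl pvStep (0, 0) := by
    rw [PySem.List.enumerate_eq_map_pyRange (d := 0), List.foldl_map]
    rw [← hglen]
    apply PySem.List.foldl_congr_mem
    intro st j hj
    have hj' := (PySem.List.mem_pyRange_one).mp hj
    have hj0 : 0 ≤ j := hj'.1
    have hjlt : j < (gaps.length : Int) := hj'.2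
    have hjn : j.toNat < gaps.length := by omega
    have hget : PySem.List.pyGetD gaps j 0 = gaps[j.toNat] :=
      PySem.List.pyGetD_eq_getElem gaps 0 hj0 hjlt
    have hjn2 : j.toNat + 1 < ss.length := by omega
    have hgj : gaps[j.toNat] = ss[j.toNat + 1] - ss[j.toNat] := by
      simp [hgaps, List.getElem_zip]
    have h1get : PySem.List.pyGetD ss (j + 1) 0 = ss[j.toNat + 1] := by
      rw [PySem.List.pyGetD_eq_getElem ss 0 (by omega) (by omega)]
      congr 1; omega
    have h2get : PySem.List.pyGetD ss j 0 = ss[j.toNat] :=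
      PySem.List.pyGetD_eq_getElem ss 0 hj0 (by omega)
    simp only [pvStep, hget, hgj, h1get, h2get]
  rw [hbridge]
  have hne : gaps ≠ [] := by
    intro hnil; rw [hnil] at hlen; simp at hlen; omega
  obtain ⟨M, hMx⟩ : ∃ M, PySem.List.max? gaps (fun y => y) = some M := by
    cases hx : PySem.List.max? gaps (fun y => y) with
    | none => exact absurd ((PySem.List.max?_eq_none_iff gaps _).mp hx) hne
    | some M => exact ⟨M, rfl⟩
  have hMmem : M ∈ gaps := PySem.List.max?_mem hMx
  have hMub : ∀ g ∈ gaps, g ≤ M := PySem.List.max?_isMax hMx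
  simp only [hMx, Option.getD_some]
  by_cases hpos : M > 0
  · rw [pvFold_max gaps M hMmem hMub 0 0 0 hpos, if_pos hpos]
    simp
  · have hall : ∀ g ∈ gaps, g ≤ 0 := fun g hg => le_trans (hMub g hg) (not_lt.mp hpos)
    rw [pvFold_all_le gaps 0 0 0 hall, if_neg hpos]
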